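-- pv_equiv track=rewrite | github.com/josephineding-2025/ptumvhack | sim/environment.py | _heading_from_vectors
-- ===== SOURCE A (Python) =====
-- def _heading_from_vectors(vectors: list[tuple[int, int]]) -> str:
--     if not vectors:
--         return "east"
--     sum_dx = sum(vector[0] for vector in vectors)
--     sum_dy = sum(vector[1] for vector in vectors)
--     if abs(sum_dx) >= abs(sum_dy):
--         return "east" if sum_dx >= 0 else "west"
--     return "south" if sum_dy >= 0 else "north"
-- ===== SOURCE B (Python) =====
-- def _heading_from_vectors(vectors: list[tuple[int, int]]) -> str:
--     # Rotate the frame 45 degrees: s and d are the projections of the net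
--     # displacement onto the (1,1) and (1,-1) diagonals, accumulated in one pass.
--     # The dominant compass axis and its sign are then exactly the sign pattern
--     # of (s, d): east <=> s>=0 and d>=0; south <=> s>0>d; north <=> d>0>s;
--     # west otherwise.  No abs(), no separate empty-list case (s=d=0 -> east).
--     s = d = 0
--     for dx, dy in vectors:
--         s += dx + dy
--         d += dx - dy
--     if s >= 0 and d >= 0:
--         return "east"
--     if s > 0:
--         return "south"
--     if d > 0:
--         return "north"
--     return "west"
-- ===== Notes on version B (the rewrite author's own statement) =====
-- stated objective: alternative
-- what changed: Instead of summing dx and dy separately and comparing absolute values, B accumulates in one pass the two diagonal projections s=sum(dx+dy) and d=sum(dx-dy) (a 45-degree frame rotation) and reads the heading off the sign pattern of (s,d), with no abs, no branch cascade on axes and no empty-list special case.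
import Mathlib
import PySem

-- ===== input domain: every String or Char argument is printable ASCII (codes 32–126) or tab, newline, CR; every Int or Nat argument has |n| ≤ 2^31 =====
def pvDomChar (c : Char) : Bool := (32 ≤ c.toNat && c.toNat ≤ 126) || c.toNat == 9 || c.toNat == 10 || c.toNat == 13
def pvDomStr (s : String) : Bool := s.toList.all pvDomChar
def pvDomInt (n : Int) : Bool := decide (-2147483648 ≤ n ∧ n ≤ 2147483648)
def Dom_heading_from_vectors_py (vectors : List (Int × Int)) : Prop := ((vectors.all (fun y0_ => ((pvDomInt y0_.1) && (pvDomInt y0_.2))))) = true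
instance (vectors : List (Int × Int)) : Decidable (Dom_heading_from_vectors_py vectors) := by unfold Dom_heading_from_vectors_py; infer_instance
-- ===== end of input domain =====

-- B replaces A's axis/abs branch cascade by a one-pass 45°-rotated accumulation (s=Σ(dx+dy), d=Σ(dx−dy)) and sign tests on (s,d); alternative algorithm, same O(n) cost.


-- ===== PORT A =====
-- Literal port of A: empty check, two generator sums, abs comparison then sign branches.
def heading_from_vectors_py (vectors : List (Int × Int)) : String :=
  if vectors = [] then "east"
  else
    let sum_dx := vectors.foldl (fun acc v => acc + v.1) (0 : Int)
    let sum_dy := vectors.foldl (fun acc v => acc + v.2) (0 : Int)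
    if |sum_dx| ≥ |sum_dy| then
      if sum_dx ≥ 0 then "east" else "west"
    else
      if sum_dy ≥ 0 then "south" else "north"

-- ===== PORT B =====
-- Port of B: one pass accumulating the diagonal projections (s, d), then sign tests.
def heading_from_vectors_py_alt (vectors : List (Int × Int)) : String :=
  let sd := vectors.foldl (fun (acc : Int × Int) v => (acc.1 + (v.1 + v.2), acc.2 + (v.1 - v.2))) (0, 0)
  if sd.1 ≥ 0 ∧ sd.2 ≥ 0 then "east"
  else if sd.1 > 0 then "south"
  else if sd.2 > 0 then "north"
  else "west"

-- ===== PRECONDITION & SPEC =====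
def Spec_heading_from_vectors_py (vectors : List (Int × Int)) (out : String) : Prop := out = heading_from_vectors_py_alt vectors
instance (vectors : List (Int × Int)) (out : String) : Decidable (Spec_heading_from_vectors_py vectors out) := by unfold Spec_heading_from_vectors_py; infer_instance

-- ===== CLAIM (what is proved, stated in full; the proofs are below) =====
def Claim_equal_heading_from_vectors_py : Prop := ∀ (vectors : List (Int × Int)), Dom_heading_from_vectors_py vectors → Spec_heading_from_vectors_py vectors (heading_from_vectors_py vectors)

-- ===== LEMMAS AND PROOFS =====

-- A's accumulator folds are shifted sums of the projected components.
lemma foldl_fst (l : List (Int × Int)) (a : Int) :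
    l.foldl (fun acc v => acc + v.1) a = a + (l.map Prod.fst).sum := by
  induction l generalizing a with
  | nil => simp
  | cons h t ih => simp [List.foldl_cons, ih]; ring

lemma foldl_snd (l : List (Int × Int)) (a : Int) :
    l.foldl (fun acc v => acc + v.2) a = a + (l.map Prod.snd).sum := by
  induction l generalizing a with
  | nil => simp
  | cons h t ih => simp [List.foldl_cons, ih]; ring

-- B's paired fold computes the two diagonal projections of the same sums.
lemma fold_sd (l : List (Int × Int)) (s d : Int) :
    l.foldl (fun (acc : Int × Int) v => (acc.1 + (v.1 + v.2), acc.2 + (v.1 - v.2))) (s, d)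
    = (s + (l.map Prod.fst).sum + (l.map Prod.snd).sum,
       d + (l.map Prod.fst).sum - (l.map Prod.snd).sum) := by
  induction l generalizing s d with
  | nil => simp
  | cons h t ih => simp [List.foldl_cons, ih]; constructor <;> ring

-- Sign pattern of (dx+dy, dx−dy) decides A's abs comparison and sign branches.
lemma heading_core (dx dy : Int) :
    (if |dx| ≥ |dy| then (if dx ≥ 0 then "east" else "west")
     else (if dy ≥ 0 then "south" else "north"))
    = (if dx + dy ≥ 0 ∧ dx - dy ≥ 0 then "east"
       else if dx + dy > 0 then "south"
       else if dx - dy > 0 then "north"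
       else "west") := by
  rcases abs_cases dx with ⟨hx, hx'⟩ <;> rcases abs_cases dy with ⟨hy, hy'⟩ <;>
    split_ifs <;> first | rfl | omega

-- ===== VERDICT (by name: the statement is the Claim_ definition above) =====
theorem heading_from_vectors_py_spec : Claim_equal_heading_from_vectors_py := by
  intro vectors _
  unfold Spec_heading_from_vectors_py heading_from_vectors_py heading_from_vectors_py_alt
  cases vectors with
  | nil => decide
  | cons h t =>
    rw [if_neg (List.cons_ne_nil h t)]
    simp only [foldl_fst, foldl_snd, fold_sd, zero_add]
    exact heading_core _ _
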